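-- pv_equiv track=rewrite | github.com/dudwk814/coding-test | programmers/연습문제/옹알이2.py | solution
-- ===== SOURCE A (Python) =====
-- from itertools import permutations
--
-- def solution(babbling):
--     array = []
--     answer = 0
--     words = ["aya", "ye", "woo", "ma"]
--     for i in range(1, 5):
--         word = list(permutations(words, i))
--         array.extend(word)
--     for i in range(len(array)):
--         word = ""
--         for j in array[i]:
--             word += j
--         array[i] = word
--
--     for word in babbling:
--         if word in array:
--             answer += 1
--
--     return answer
-- ===== SOURCE B (Python) =====
-- def solution(babbling):
--     sounds = ("aya", "ye", "woo", "ma")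
--     answer = 0
--     for word in babbling:
--         i = 0
--         used = set()
--         count = 0
--         ok = True
--         while i < len(word):
--             for s in sounds:
--                 # the four sounds start with distinct letters, so at most one can match here
--                 if s not in used and word.startswith(s, i):
--                     used.add(s)
--                     count += 1
--                     i += len(s)
--                     break
--             else:
--                 ok = False
--                 break
--         if ok and count >= 1:
--             answer += 1
--     return answer
-- ===== Notes on version B (the rewrite author's own statement) =====
-- stated objective: alternative
-- what changed: B drops the precomputed 64-entry permutation table entirely and instead greedily parses each word left to right, consuming the unique not-yet-used sound that starts at the current position (the four sounds have distinct first letters, so parsing is deterministic) and accepting iff the word is fully consumed with at least one sound.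
import Mathlib
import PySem

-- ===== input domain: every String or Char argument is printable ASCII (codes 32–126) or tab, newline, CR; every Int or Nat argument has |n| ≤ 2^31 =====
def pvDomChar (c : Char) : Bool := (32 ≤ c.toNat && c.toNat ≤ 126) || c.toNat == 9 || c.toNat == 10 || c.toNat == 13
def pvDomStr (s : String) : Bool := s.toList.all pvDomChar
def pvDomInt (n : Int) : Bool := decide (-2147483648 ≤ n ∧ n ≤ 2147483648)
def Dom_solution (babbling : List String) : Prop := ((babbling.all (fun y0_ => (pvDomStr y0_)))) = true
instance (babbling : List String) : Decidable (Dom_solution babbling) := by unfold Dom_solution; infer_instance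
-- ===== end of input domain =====

-- B replaces A's precomputed 64-entry permutation table by a deterministic greedy parse of each
-- word (the four sounds have distinct first letters); alternative algorithm, same result.

-- ===== PORT A =====
-- array = []; for i in range(1,5): array.extend(permutations(words, i))
-- then array[i] = "".join of each tuple (the word += j loop), as a map over the list
def pvArrayA : List String :=
  (((PySem.List.pyRange 1 5 1).foldl
      (fun acc i => acc ++ PySem.List.permutations ["aya", "ye", "woo", "ma"] i.toNat) []).map
    (fun t => t.foldl (fun word j => word ++ j) ""))

def solution (babbling : List String) : Int :=
  babbling.foldl (fun answer word => if word ∈ pvArrayA then answer + 1 else answer) 0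

-- ===== PORT B =====
-- the while-loop of Source B: scan the word left to right; ua/uy/uw/um = "sound already used",
-- cnt = number of sounds consumed; the inner for tries "aya","ye","woo","ma" in that order
-- (word.startswith(s, i) becomes the pattern on the remaining characters)
def pvParse : List Char → Bool → Bool → Bool → Bool → Nat → Bool
  | [], _, _, _, _, cnt => decide (1 ≤ cnt)
  | 'a' :: 'y' :: 'a' :: rest, ua, uy, uw, um, cnt =>
      if ua then false else pvParse rest true uy uw um (cnt + 1)
  | 'y' :: 'e' :: rest, ua, uy, uw, um, cnt =>
      if uy then false else pvParse rest ua true uw um (cnt + 1)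
  | 'w' :: 'o' :: 'o' :: rest, ua, uy, uw, um, cnt =>
      if uw then false else pvParse rest ua uy true um (cnt + 1)
  | 'm' :: 'a' :: rest, ua, uy, uw, um, cnt =>
      if um then false else pvParse rest ua uy uw true (cnt + 1)
  | _, _, _, _, _, _ => false

def solution_alt (babbling : List String) : Int :=
  babbling.foldl
    (fun answer word =>
      if pvParse word.toList false false false false 0 then answer + 1 else answer) 0

-- ===== PRECONDITION & SPEC =====
def Spec_solution (babbling : List String) (out : Int) : Prop := out = solution_alt babbling
instance (babbling : List String) (out : Int) : Decidable (Spec_solution babbling out) := by unfold Spec_solution; infer_instance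

-- ===== CLAIM (what is proved, stated in full; the proofs are below) =====
def Claim_equal_solution : Prop := ∀ (babbling : List String), Dom_solution babbling → Spec_solution babbling (solution babbling)

-- ===== LEMMAS AND PROOFS =====

-- all concatenations of ≤ n further sounds drawn without repetition from the unused ones,
-- including the empty concatenation iff `any` (= at least one sound consumed already)
def pvLang : Nat → Bool → Bool → Bool → Bool → Bool → List (List Char)
  | 0, _, _, _, _, any => if any then [[]] else []
  | n + 1, ua, uy, uw, um, any =>
    (if any then [[]] else []) ++
    (if ua then [] else (pvLang n true uy uw um true).map (['a', 'y', 'a'] ++ ·)) ++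
    (if uy then [] else (pvLang n ua true uw um true).map (['y', 'e'] ++ ·)) ++
    (if uw then [] else (pvLang n ua uy true um true).map (['w', 'o', 'o'] ++ ·)) ++
    (if um then [] else (pvLang n ua uy uw true true).map (['m', 'a'] ++ ·))

lemma pvParse_sound : ∀ (cs : List Char) (ua uy uw um : Bool) (cnt : Nat),
    pvParse cs ua uy uw um cnt = true → cs ∈ pvLang 4 ua uy uw um (decide (1 ≤ cnt)) := by
  intro cs ua uy uw um cnt
  fun_induction pvParse cs ua uy uw um cnt with
  | case1 _ _ _ _ cnt =>
      intro h
      simp only [decide_eq_true_eq] at h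
      simp [pvLang, h]
  | case2 rest uy uw um cnt => intro h; simp at h
  | case3 rest ua uy uw um cnt hua ih =>
      intro h
      have hm := ih h
      simp only [Nat.le_add_left, decide_true] at hm
      have hua' : ua = false := by simpa using hua
      subst hua'
      revert hm
      cases uy <;> cases uw <;> cases um <;> cases h1 : decide (1 ≤ cnt) <;>
        (intro hm; fin_cases hm <;> decide)
  | case4 rest ua uw um cnt => intro h; simp at h
  | case5 rest ua uy uw um cnt huy ih =>
      intro h
      have hm := ih h
      simp only [Nat.le_add_left, decide_true] at hm
      have huy' : uy = false := by simpa using huy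
      subst huy'
      revert hm
      cases ua <;> cases uw <;> cases um <;> cases h1 : decide (1 ≤ cnt) <;>
        (intro hm; fin_cases hm <;> decide)
  | case6 rest ua uy um cnt => intro h; simp at h
  | case7 rest ua uy uw um cnt huw ih =>
      intro h
      have hm := ih h
      simp only [Nat.le_add_left, decide_true] at hm
      have huw' : uw = false := by simpa using huw
      subst huw'
      revert hm
      cases ua <;> cases uy <;> cases um <;> cases h1 : decide (1 ≤ cnt) <;>
        (intro hm; fin_cases hm <;> decide)
  | case8 rest ua uy uw cnt => intro h; simp at h
  | case9 rest ua uy uw um cnt hum ih =>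
      intro h
      have hm := ih h
      simp only [Nat.le_add_left, decide_true] at hm
      have hum' : um = false := by simpa using hum
      subst hum'
      revert hm
      cases ua <;> cases uy <;> cases uw <;> cases h1 : decide (1 ≤ cnt) <;>
        (intro hm; fin_cases hm <;> decide)
  | case10 => intro h; simp at h

lemma pvLang_subset_arrayA :
    ∀ cs ∈ pvLang 4 false false false false false, String.ofList cs ∈ pvArrayA := by decide

lemma pvArrayA_parse : ∀ w ∈ pvArrayA, pvParse w.toList false false false false 0 = true := by
  decide

lemma pvWord_iff (w : String) :
    (w ∈ pvArrayA) ↔ pvParse w.toList false false false false 0 = true := by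
  constructor
  · exact pvArrayA_parse w
  · intro h
    have hm := pvParse_sound w.toList false false false false 0 h
    simp only [show decide (1 ≤ 0) = false from rfl] at hm
    have := pvLang_subset_arrayA _ hm
    simpa using this

lemma pvFold_eq : ∀ (l : List String) (acc : Int),
    l.foldl (fun answer word => if word ∈ pvArrayA then answer + 1 else answer) acc =
    l.foldl (fun answer word =>
      if pvParse word.toList false false false false 0 then answer + 1 else answer) acc := by
  intro l
  induction l with
  | nil => intro acc; rfl
  | cons w l ih =>
      intro acc
      simp only [List.foldl_cons]
      rw [show (if w ∈ pvArrayA then acc + 1 else acc) =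
            (if pvParse w.toList false false false false 0 then acc + 1 else acc) by
          by_cases h : w ∈ pvArrayA
          · rw [if_pos h, if_pos ((pvWord_iff w).mp h)]
          · rw [if_neg h, if_neg (fun hc => h ((pvWord_iff w).mpr hc))]]
      exact ih _

-- ===== VERDICT (by name: the statement is the Claim_ definition above) =====
theorem solution_spec : Claim_equal_solution := by
  intro babbling _
  unfold Spec_solution solution solution_alt
  exact pvFold_eq babbling 0
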